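-- pv_equiv track=rewrite | github.com/davidrmcharles/pecunia-old | python/importing.py | _split_transaction_line
-- ===== SOURCE A (Python) =====
-- def _split_transaction_line(line):
--     maybe_tokens = line.strip().split(',')
--
--     tokens = []
--     for maybeToken in maybe_tokens:
--         if maybeToken.startswith(' ') and (len(maybeToken) > 1):
--             tokens[-1] = tokens[-1] + ',' + maybeToken
--         else:
--             tokens.append(maybeToken)
--     return tokens
-- ===== SOURCE B (Python) =====
-- import re
--
-- def _split_transaction_line(line):
--     # Split on commas, except a comma followed by a space and a further
--     # non-comma character, which is a continuation of the previous field.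
--     return re.split(r',(?! [^,])', line.strip())
-- ===== Notes on version B (the rewrite author's own statement) =====
-- stated objective: idiomatic
-- what changed: Replaces the split-then-rejoin loop (with in-place mutation of the last token) by a single regex split on the stripped line, r',(?! [^,])', whose negative lookahead keeps exactly the commas that A's loop rejoins.
import Mathlib
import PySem

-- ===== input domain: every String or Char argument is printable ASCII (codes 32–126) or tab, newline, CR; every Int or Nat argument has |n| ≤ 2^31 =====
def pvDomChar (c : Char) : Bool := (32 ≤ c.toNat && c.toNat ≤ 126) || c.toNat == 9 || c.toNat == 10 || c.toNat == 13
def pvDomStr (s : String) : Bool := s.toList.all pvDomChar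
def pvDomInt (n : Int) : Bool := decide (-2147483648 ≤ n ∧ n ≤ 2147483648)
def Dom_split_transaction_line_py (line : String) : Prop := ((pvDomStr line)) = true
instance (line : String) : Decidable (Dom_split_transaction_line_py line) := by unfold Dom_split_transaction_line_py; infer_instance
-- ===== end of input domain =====

-- B replaces A's split-then-rejoin loop (which mutates tokens[-1] in place) by a
-- single regex split r',(?! [^,])' on the stripped line (objective: idiomatic);
-- equality of the return values is proved for all inputs.

-- ===== PORT A =====
-- one step of A's loop; `tokens[-1] = tokens[-1] + ',' + maybeToken` is ported
-- with getLast?/dropLast — the empty-tokens case would be Python's IndexError,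
-- which is unreachable because line.strip() guarantees the first field never
-- starts with ' ' (proved below, pv_first_not_cont).
def split_transaction_line_py_step (tokens : List String) (t : String) : List String :=
  if PySem.Str.startswith t " " && decide (1 < PySem.Str.len t) then
    tokens.dropLast ++ [(tokens.getLast?.getD "") ++ "," ++ t]
  else
    tokens ++ [t]

def split_transaction_line_py (line : String) : List String :=
  let maybe_tokens := (PySem.Str.split? (PySem.Str.strip line) ",").getD []
  maybe_tokens.foldl split_transaction_line_py_step []

-- ===== PORT B =====
-- B is `re.split(r',(?! [^,])', line.strip())`. PySem has no regexes, so the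
-- regex split is ported by hand, step for step as the regex engine runs it:
-- scan left to right and split at a ',' exactly when the negative lookahead
-- `(?! [^,])` succeeds there, i.e. when the comma is NOT followed by a space
-- and then a non-comma character. Exact for this pattern on all inputs.
def split_transaction_line_py_lookahead_fails (rest : List Char) : Bool :=
  match rest with
  | c :: d :: _ => !(c == ' ' && d != ',')
  | _ => true

def split_transaction_line_py_scan : List Char → List Char → List String
  | [], cur => [String.ofList cur]
  | c :: rest, cur =>
    if c = ',' ∧ split_transaction_line_py_lookahead_fails rest then
      String.ofList cur :: split_transaction_line_py_scan rest []
    else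
      split_transaction_line_py_scan rest (cur ++ [c])

def split_transaction_line_py_alt (line : String) : List String :=
  split_transaction_line_py_scan (PySem.Str.strip line).toList []

-- ===== PRECONDITION & SPEC =====
def Spec_split_transaction_line_py (line : String) (out : List String) : Prop := out = split_transaction_line_py_alt line
instance (line : String) (out : List String) : Decidable (Spec_split_transaction_line_py line out) := by unfold Spec_split_transaction_line_py; infer_instance

-- ===== CLAIM (what is proved, stated in full; the proofs are below) =====
def Claim_equal_split_transaction_line_py : Prop := ∀ (line : String), Dom_split_transaction_line_py line → Spec_split_transaction_line_py line (split_transaction_line_py line)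

-- ===== LEMMAS AND PROOFS =====

def pvFields : List Char → List (List Char)
  | [] => [[]]
  | c :: r =>
    if c = ',' then [] :: pvFields r
    else
      match pvFields r with
      | f :: fs => (c :: f) :: fs
      | [] => []

def pvPrepend (p : List Char) : List (List Char) → List (List Char)
  | f :: fs => (p ++ f) :: fs
  | [] => []

lemma pvFields_ne_nil (l : List Char) : pvFields l ≠ [] := by
  induction l with
  | nil => simp [pvFields]
  | cons c r ih =>
    simp only [pvFields]
    split
    · simp
    · cases h : pvFields r with
      | nil => exact absurd h ih
      | cons f fs => simp

lemma pv_go_comma : ∀ (fuel : ℕ) (l rcur : List Char) (acc : List (List Char)), l.length < fuel →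
    PySem.Chars.splitOn.go [','] fuel l rcur acc = acc.reverse ++ pvPrepend rcur.reverse (pvFields l) := by
  intro fuel
  induction fuel with
  | zero => intro l rcur acc h; omega
  | succ n ih =>
    intro l rcur acc h
    cases l with
    | nil =>
      simp [PySem.Chars.splitOn.go, pvFields, pvPrepend]
    | cons c rest =>
      by_cases hc : c = ','
      · subst hc
        rw [show PySem.Chars.splitOn.go [','] (n+1) (','::rest) rcur acc
              = PySem.Chars.splitOn.go [','] n rest [] (rcur.reverse :: acc) from by
            simp [PySem.Chars.splitOn.go, List.isPrefixOf]]
        have := ih rest ([] : List Char) (rcur.reverse :: acc) (by simpa using Nat.lt_of_succ_lt_succ h)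
        rw [this]
        simp only [pvFields]
        cases hf : pvFields rest with
        | nil => exact absurd hf (pvFields_ne_nil rest)
        | cons f fs => simp [pvPrepend]
      · rw [show PySem.Chars.splitOn.go [','] (n+1) (c::rest) rcur acc
              = PySem.Chars.splitOn.go [','] n rest (c :: rcur) acc from by
            simp [PySem.Chars.splitOn.go, List.isPrefixOf, Ne.symm hc]]
        have := ih rest (c :: rcur) acc (by simpa using Nat.lt_of_succ_lt_succ h)
        rw [this]
        simp only [pvFields, if_neg hc, List.reverse_cons]
        cases hf : pvFields rest with
        | nil => exact absurd hf (pvFields_ne_nil rest)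
        | cons f fs => simp [pvPrepend]

lemma pv_splitOn_comma (s : List Char) : PySem.Chars.splitOn s [','] = pvFields s := by
  have := pv_go_comma (s.length + 1) s [] [] (by omega)
  rw [PySem.Chars.splitOn]
  rw [this]
  simp only [List.reverse_nil]
  cases hf : pvFields s with
  | nil => exact absurd hf (pvFields_ne_nil s)
  | cons f fs => simp [pvPrepend]

def pvCont (f : List Char) : Bool := [' '].isPrefixOf f && decide (1 < f.length)

def pvAux : List Char → List (List Char) → List String
  | t, [] => [String.ofList t]
  | t, u :: rest =>
    if pvCont u then pvAux (t ++ ',' :: u) rest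
    else String.ofList t :: pvAux u rest

-- the lookahead fails exactly when the next field is a continuation
lemma pv_look_eq_cont (rest : List Char) (f : List Char) (fs : List (List Char))
    (hf : pvFields rest = f :: fs) : split_transaction_line_py_lookahead_fails rest = !(pvCont f) := by
  cases rest with
  | nil =>
    simp [pvFields] at hf
    obtain ⟨h1, _⟩ := hf
    subst h1
    simp [split_transaction_line_py_lookahead_fails, pvCont]
  | cons c r =>
    by_cases hc : c = ','
    · subst hc
      simp [pvFields] at hf
      obtain ⟨h1, _⟩ := hf
      subst h1
      cases r with
      | nil => simp [split_transaction_line_py_lookahead_fails, pvCont]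
      | cons d r' => simp [split_transaction_line_py_lookahead_fails, pvCont]
    · have hfr := pvFields_ne_nil r
      cases hr : pvFields r with
      | nil => exact absurd hr hfr
      | cons f' fs' =>
        simp only [pvFields, if_neg hc, hr] at hf
        have h1 : f = c :: f' := (List.cons.injEq .. ▸ hf).1.symm
        subst h1
        cases r with
        | nil =>
          simp [pvFields] at hr
          obtain ⟨h1, _⟩ := hr
          subst h1
          simp [split_transaction_line_py_lookahead_fails, pvCont]
        | cons d r' =>
          by_cases hd : d = ','
          · subst hd
            simp [pvFields] at hr
            obtain ⟨h1, _⟩ := hr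
            subst h1
            simp [split_transaction_line_py_lookahead_fails, pvCont]
          · have hne : f' ≠ [] := by
              cases hr' : pvFields r' with
              | nil => exact absurd hr' (pvFields_ne_nil r')
              | cons g gs =>
                simp only [pvFields, if_neg hd, hr'] at hr
                have := (List.cons.injEq .. ▸ hr).1
                rw [← this]; simp
            have h0 : 0 < f'.length := List.length_pos_iff.mpr hne
            simp [split_transaction_line_py_lookahead_fails, pvCont, List.isPrefixOf, hd, h0, BEq.comm]

-- B's character scan computes pvAux over the comma fields
lemma pv_scan_eq_aux : ∀ (chars cur : List Char),
    split_transaction_line_py_scan chars cur =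
      match pvFields chars with
      | f :: fs => pvAux (cur ++ f) fs
      | [] => [] := by
  intro chars
  induction chars with
  | nil => intro cur; simp [split_transaction_line_py_scan, pvFields, pvAux]
  | cons c rest ih =>
    intro cur
    cases hf : pvFields rest with
    | nil => exact absurd hf (pvFields_ne_nil rest)
    | cons f fs =>
      by_cases hc : c = ','
      · subst hc
        have hlook := pv_look_eq_cont rest f fs hf
        by_cases hcont : pvCont f = true
        · have : ¬ ((',' : Char) = ',' ∧ split_transaction_line_py_lookahead_fails rest = true) := by
            simp [hlook, hcont]
          rw [split_transaction_line_py_scan, if_neg this]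
          rw [ih (cur ++ [','])]
          simp only [pvFields, hf]
          simp [pvAux, hcont]
        · have hcf : pvCont f = false := by simpa using hcont
          have : ((',' : Char) = ',' ∧ split_transaction_line_py_lookahead_fails rest = true) := by simp [hlook, hcf]
          rw [split_transaction_line_py_scan, if_pos this]
          rw [ih []]
          simp only [pvFields, hf]
          simp [pvAux, hcf]
      · rw [split_transaction_line_py_scan]
        rw [if_neg (by simp [hc])]
        rw [ih (cur ++ [c])]
        simp only [pvFields, if_neg hc, hf]
        simp

-- A's fold with a nonempty accumulator
lemma pv_fold_eq_aux (step : List String → String → List String)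
    (hstep : ∀ tokens t, step tokens t =
      if pvCont t.toList then tokens.dropLast ++ [(tokens.getLast?.getD "") ++ "," ++ t] else tokens ++ [t]) :
    ∀ (fs : List (List Char)) (t : List Char) (acc : List String),
      List.foldl step (acc ++ [String.ofList t]) (fs.map String.ofList) = acc ++ pvAux t fs := by
  intro fs
  induction fs with
  | nil => intro t acc; simp [pvAux]
  | cons u rest ih =>
    intro t acc
    simp only [List.map_cons, List.foldl_cons]
    rw [hstep]
    by_cases hcont : pvCont u = true
    · rw [if_pos (by simpa using hcont)]
      rw [List.dropLast_concat, List.getLast?_concat]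
      have : (String.ofList t) ++ "," ++ (String.ofList u) = String.ofList (t ++ ',' :: u) := by
        have h : (',' :: u) = [','] ++ u := rfl
        rw [h, String.ofList_append, String.ofList_append, ← String.append_assoc]
      simp only [Option.getD_some, this]
      rw [ih (t ++ ',' :: u) acc]
      simp [pvAux, hcont]
    · have hcf : pvCont u = false := by simpa using hcont
      rw [if_neg (by simp [hcf])]
      rw [ih u (acc ++ [String.ofList t])]
      simp [pvAux, hcf]

lemma pv_dropWhile_head (p : Char → Bool) : ∀ (l : List Char) (c : Char) (r : List Char),
    l.dropWhile p = c :: r → p c = false := by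
  intro l
  induction l with
  | nil => intro c r h; simp at h
  | cons x xs ih =>
    intro c r h
    by_cases hx : p x = true
    · rw [List.dropWhile_cons_of_pos hx] at h; exact ih c r h
    · rw [List.dropWhile_cons_of_neg hx] at h
      obtain ⟨h1, _⟩ := List.cons.injEq .. ▸ h
      rw [← h1]; simpa using hx

lemma pv_strip_head (s : List Char) (c : Char) (r : List Char)
    (h : PySem.Chars.strip s = c :: r) : PySem.Chars.isspace c = false := by
  rw [PySem.Chars.strip] at h
  have hpre : PySem.Chars.rstrip (PySem.Chars.lstrip s) <+: PySem.Chars.lstrip s := by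
    rw [PySem.Chars.rstrip]
    have h1 : List.dropWhile PySem.Chars.isspace (PySem.Chars.lstrip s).reverse <:+ (PySem.Chars.lstrip s).reverse :=
      List.dropWhile_suffix _
    have h2 := h1.reverse
    rwa [List.reverse_reverse] at h2
  rw [h] at hpre
  obtain ⟨tail, htail⟩ := hpre
  cases hl : PySem.Chars.lstrip s with
  | nil => rw [hl] at htail; simp at htail
  | cons c' r' =>
    rw [hl] at htail
    have : c = c' := by
      have := (List.cons.injEq .. ▸ htail).1
      simpa using this
    subst this
    exact pv_dropWhile_head _ s c r' hl

-- first field of a stripped string is never a continuation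
lemma pv_first_not_cont (s : List Char) (f : List Char) (fs : List (List Char))
    (hf : pvFields (PySem.Chars.strip s) = f :: fs) : pvCont f = false := by
  cases hs : PySem.Chars.strip s with
  | nil =>
    rw [hs] at hf; simp [pvFields] at hf
    obtain ⟨h1, _⟩ := hf; subst h1; simp [pvCont]
  | cons c r =>
    have hc := pv_strip_head s c r hs
    rw [hs] at hf
    by_cases hcc : c = ','
    · subst hcc
      simp [pvFields] at hf
      obtain ⟨h1, _⟩ := hf; subst h1; simp [pvCont]
    · cases hr : pvFields r with
      | nil => exact absurd hr (pvFields_ne_nil r)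
      | cons f' fs' =>
        simp only [pvFields, if_neg hcc, hr] at hf
        have h1 : f = c :: f' := (List.cons.injEq .. ▸ hf).1.symm
        subst h1
        have hcsp : c ≠ ' ' := by
          intro h; subst h; simp [PySem.Chars.isspace] at hc
        simp [pvCont, List.isPrefixOf]
        intro h; exact absurd h.symm hcsp

lemma pv_step_eq (tokens : List String) (t : String) :
    split_transaction_line_py_step tokens t =
      if pvCont t.toList then tokens.dropLast ++ [(tokens.getLast?.getD "") ++ "," ++ t]
      else tokens ++ [t] := by
  have : (PySem.Str.startswith t " " && decide (1 < PySem.Str.len t)) = pvCont t.toList := by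
    simp [PySem.Str.startswith_eq, PySem.Chars.startswith, PySem.Str.len_eq, pvCont]
  rw [split_transaction_line_py_step, this]

lemma pv_split_eq (line : String) :
    (PySem.Str.split? (PySem.Str.strip line) ",").getD [] =
      (pvFields (PySem.Chars.strip line.toList)).map String.ofList := by
  rw [PySem.Str.split?, PySem.Chars.split?]
  simp [PySem.Str.toList_strip, pv_splitOn_comma]


-- ===== VERDICT (by name: the statement is the Claim_ definition above) =====
theorem split_transaction_line_py_spec : Claim_equal_split_transaction_line_py := by
  intro line _
  unfold Spec_split_transaction_line_py split_transaction_line_py split_transaction_line_py_alt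
  rw [pv_split_eq]
  rw [pv_scan_eq_aux]
  have htl : (PySem.Str.strip line).toList = PySem.Chars.strip line.toList := PySem.Str.toList_strip line
  rw [htl]
  cases hf : pvFields (PySem.Chars.strip line.toList) with
  | nil => exact absurd hf (pvFields_ne_nil _)
  | cons f fs =>
    have hnc : pvCont f = false := pv_first_not_cont line.toList f fs hf
    simp only [List.map_cons, List.foldl_cons]
    have h0 : split_transaction_line_py_step [] (String.ofList f) = [String.ofList f] := by
      rw [pv_step_eq]
      simp [hnc]
    rw [h0]
    have := pv_fold_eq_aux split_transaction_line_py_step pv_step_eq fs f []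
    simpa using this
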